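-- pv_equiv track=rewrite | github.com/3N3G/Imagination | scripts/create_vllm_config_auto.py | _normalize_explicit_layers
-- ===== SOURCE A (Python) =====
-- from typing import List, Optional
--
-- def _normalize_explicit_layers(raw_layers: List[int], num_layers: int) -> List[int]:
--     norm: List[int] = []
--     for v in raw_layers:
--         idx = int(v)
--         if idx < 0:
--             idx = num_layers + idx
--         if idx < 0 or idx >= num_layers:
--             raise ValueError(f"Layer index {v} out of range for num_layers={num_layers}")
--         norm.append(idx)
--     return sorted(set(norm))
-- ===== SOURCE B (Python) =====
-- def _normalize_explicit_layers(raw_layers, num_layers):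
--     # Single fused pass: instead of collecting all indices and then calling
--     # sorted(set(...)), maintain `out` as a sorted, duplicate-free list and
--     # insert each validated index in place (online insertion sort with dedup).
--     out = []
--     for v in raw_layers:
--         idx = int(v)
--         if idx < 0:
--             idx = num_layers + idx
--         if idx < 0 or idx >= num_layers:
--             raise ValueError(f"Layer index {v} out of range for num_layers={num_layers}")
--         i = 0
--         while i < len(out) and out[i] < idx:
--             i += 1
--         if i == len(out) or out[i] != idx:
--             out.insert(i, idx)
--     return out
-- ===== Notes on version B (the rewrite author's own statement) =====
-- stated objective: alternative
-- what changed: Replaces the collect-all-then-sorted(set(...)) staging with a single fused pass that keeps the output sorted and duplicate-free throughout, inserting each validated index at its position (online insertion sort with deduplication); no set and no final sort exist in B.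
import Mathlib
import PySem

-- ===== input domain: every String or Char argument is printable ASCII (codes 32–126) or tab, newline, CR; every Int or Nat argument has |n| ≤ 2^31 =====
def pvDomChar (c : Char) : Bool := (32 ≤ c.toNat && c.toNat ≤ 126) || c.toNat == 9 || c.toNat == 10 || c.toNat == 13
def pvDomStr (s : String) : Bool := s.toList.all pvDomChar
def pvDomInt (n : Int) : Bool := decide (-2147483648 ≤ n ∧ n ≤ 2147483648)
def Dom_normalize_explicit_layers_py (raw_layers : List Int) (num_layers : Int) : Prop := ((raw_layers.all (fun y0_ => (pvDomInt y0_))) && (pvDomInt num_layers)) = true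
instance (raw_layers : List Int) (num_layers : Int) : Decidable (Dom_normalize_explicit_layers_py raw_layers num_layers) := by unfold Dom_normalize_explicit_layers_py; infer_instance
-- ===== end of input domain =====

-- B replaces A's collect-then-sorted(set(...)) staging with one fused pass that keeps
-- the output sorted and duplicate-free via online insertion (no set, no final sort).

-- ===== PORT A =====
-- A's validation loop: none = the ValueError raise
def pvLoopA (n : Int) : List Int → List Int → Option (List Int)
  | [], norm => some norm
  | v :: rest, norm =>
    let idx := if v < 0 then n + v else v
    if idx < 0 ∨ n ≤ idx then none
    else pvLoopA n rest (norm ++ [idx])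

def normalize_explicit_layers_py (raw_layers : List Int) (num_layers : Int) : List Int :=
  (pvLoopA num_layers raw_layers []).elim []
    (fun norm => PySem.List.sorted (PySem.Set.ofList norm) (fun x => x) false)

-- ===== PORT B =====
-- 'i = 0; while i < len(out) and out[i] < idx: i += 1; if i == len(out) or out[i] != idx: out.insert(i, idx)'
-- as the obvious structural recursion on the sorted output list
def pvInsU : List Int → Int → List Int
  | [], x => [x]
  | y :: ys, x => if y < x then y :: pvInsU ys x else if y = x then y :: ys else x :: y :: ys

-- B's fused loop: validate and insert in one pass; none = the ValueError raise
def pvLoopB (n : Int) : List Int → List Int → Option (List Int)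
  | [], out => some out
  | v :: rest, out =>
    let idx := if v < 0 then n + v else v
    if idx < 0 ∨ n ≤ idx then none
    else pvLoopB n rest (pvInsU out idx)

def normalize_explicit_layers_py_alt (raw_layers : List Int) (num_layers : Int) : List Int :=
  (pvLoopB num_layers raw_layers []).elim [] (fun out => out)

-- ===== PRECONDITION & SPEC =====
-- Pre_ excludes exactly the inputs on which A raises ValueError (some element whose
-- negative-wrapped index falls outside [0, num_layers)).
def Pre_normalize_explicit_layers_py (raw_layers : List Int) (num_layers : Int) : Prop :=
  ∀ v ∈ raw_layers, 0 ≤ (if v < 0 then num_layers + v else v) ∧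
    (if v < 0 then num_layers + v else v) < num_layers
instance (raw_layers : List Int) (num_layers : Int) : Decidable (Pre_normalize_explicit_layers_py raw_layers num_layers) := by unfold Pre_normalize_explicit_layers_py; infer_instance
def pvWitness_normalize_explicit_layers_py : List Int × Int := ([1, -1, 1, 0], 3)

def Spec_normalize_explicit_layers_py (raw_layers : List Int) (num_layers : Int) (out : List Int) : Prop := out = normalize_explicit_layers_py_alt raw_layers num_layers
instance (raw_layers : List Int) (num_layers : Int) (out : List Int) : Decidable (Spec_normalize_explicit_layers_py raw_layers num_layers out) := by unfold Spec_normalize_explicit_layers_py; infer_instance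

-- ===== CLAIM =====
def Claim_equal_normalize_explicit_layers_py : Prop := ∀ (raw_layers : List Int) (num_layers : Int), Dom_normalize_explicit_layers_py raw_layers num_layers → Pre_normalize_explicit_layers_py raw_layers num_layers → Spec_normalize_explicit_layers_py raw_layers num_layers (normalize_explicit_layers_py raw_layers num_layers)

-- ===== LEMMAS AND PROOFS =====

theorem mem_pvInsU (l : List Int) (x a : Int) : a ∈ pvInsU l x ↔ a = x ∨ a ∈ l := by
  induction l with
  | nil => simp [pvInsU]
  | cons y ys ih =>
    simp only [pvInsU]
    split_ifs with h1 h2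
    · simp [ih]; tauto
    · subst h2; simp
    · simp

theorem pairwise_pvInsU (l : List Int) (x : Int) (h : l.Pairwise (· < ·)) :
    (pvInsU l x).Pairwise (· < ·) := by
  induction l with
  | nil => simp [pvInsU]
  | cons y ys ih =>
    rcases List.pairwise_cons.mp h with ⟨hy, hys⟩
    simp only [pvInsU]
    split_ifs with h1 h2
    · refine List.pairwise_cons.mpr ⟨fun z hz => ?_, ih hys⟩
      rcases (mem_pvInsU ys x z).mp hz with rfl | hz
      · exact h1
      · exact hy z hz
    · exact h
    · have hx : x < y := lt_of_le_of_ne (not_lt.mp h1) (fun e => h2 e.symm)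
      refine List.pairwise_cons.mpr ⟨fun z hz => ?_, h⟩
      rcases List.mem_cons.mp hz with rfl | hz
      · exact hx
      · exact lt_trans hx (hy z hz)

theorem mem_foldl_pvInsU (l acc : List Int) (a : Int) :
    a ∈ l.foldl pvInsU acc ↔ a ∈ acc ∨ a ∈ l := by
  induction l generalizing acc with
  | nil => simp
  | cons v vs ih =>
    simp only [List.foldl_cons, ih, mem_pvInsU, List.mem_cons]
    tauto

theorem pairwise_foldl_pvInsU (l acc : List Int) (h : acc.Pairwise (· < ·)) :
    (l.foldl pvInsU acc).Pairwise (· < ·) := by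
  induction l generalizing acc with
  | nil => exact h
  | cons v vs ih => exact ih _ (pairwise_pvInsU acc v h)

-- A's sorted(set(norm)) equals folding B's sorted-unique insertion over norm
theorem pv_tail_eq (norm : List Int) :
    PySem.List.sorted (PySem.Set.ofList norm) (fun x => x) false = norm.foldl pvInsU [] := by
  have hpw : (norm.foldl pvInsU []).Pairwise (· < ·) :=
    pairwise_foldl_pvInsU norm [] (by simp)
  apply PySem.List.sorted_eq_of_perm_of_pairwise_lt
  · apply (List.perm_ext_iff_of_nodup ?_ ?_).mpr
    · intro a
      rw [mem_foldl_pvInsU, PySem.Set.mem_ofList]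
      simp
    · exact hpw.imp (fun h => ne_of_lt h)
    · exact PySem.Set.nodup_ofList norm
  · exact hpw

-- A's loop with accumulator acc is its empty-accumulator run prefixed by acc
theorem pvLoopA_shift (n : Int) (l acc : List Int) :
    pvLoopA n l acc = (pvLoopA n l []).map (fun norm => acc ++ norm) := by
  induction l generalizing acc with
  | nil => simp [pvLoopA]
  | cons v rest ih =>
    simp only [pvLoopA]
    split_ifs <;>
      first
        | rfl
        | ((conv_lhs => rw [ih]); (conv_rhs => rw [ih]);
           cases pvLoopA n rest [] <;> simp)

-- B's fused loop equals A's loop followed by the insertion fold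
theorem pv_loops (n : Int) (l out : List Int) :
    pvLoopB n l out = (pvLoopA n l []).map (fun norm => norm.foldl pvInsU out) := by
  induction l generalizing out with
  | nil => rfl
  | cons v rest ih =>
    simp only [pvLoopA, pvLoopB]
    split_ifs <;>
      first
        | rfl
        | (rw [ih]; (conv_rhs => rw [pvLoopA_shift]);
           cases pvLoopA n rest [] <;> simp)

-- ===== VERDICT =====
theorem normalize_explicit_layers_py_spec : Claim_equal_normalize_explicit_layers_py := by
  intro raw_layers num_layers _ _
  unfold Spec_normalize_explicit_layers_py normalize_explicit_layers_py normalize_explicit_layers_py_alt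
  rw [pv_loops]
  cases pvLoopA num_layers raw_layers [] with
  | none => rfl
  | some norm => exact pv_tail_eq norm
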